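-- pv_equiv track=rewrite | github.com/rguerreroayon/EmSys_Python | Asignacion15/encuesta2.py | clasificaAlumnosCarrera
-- ===== SOURCE A (Python) =====
-- def clasificaAlumnosCarrera(alumnosCategoria):
--     carreras = list()
--     keys2 = list(alumnosCategoria.keys())
--     for i in range(len(alumnosCategoria)):
--         carreras.append(keys2[i][1])
--     alumnosCarrera = dict.fromkeys(carreras, 0)
--     keys = list(alumnosCategoria.keys())
--     values = list(alumnosCategoria.values())
--     for i in range(len(alumnosCategoria)):
--         if(keys[i][1] in alumnosCarrera):
--             val = int(alumnosCarrera.get(keys[i][1]))+values[i]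
--             alumnosCarrera.update({keys[i][1]: val})
--     return alumnosCarrera
-- ===== SOURCE B (Python) =====
-- def clasificaAlumnosCarrera(alumnosCategoria):
--     # Two staged passes: first collect the distinct carreras in first-appearance
--     # order, then compute each group's total by a per-carrera filtered sum.
--     carreras = []
--     for key in alumnosCategoria:
--         if key[1] not in carreras:
--             carreras.append(key[1])
--     return {c: sum(v for k, v in alumnosCategoria.items() if k[1] == c)
--             for c in carreras}
-- ===== Notes on version B (the rewrite author's own statement) =====
-- stated objective: alternative
-- what changed: Replaces A's incremental dict accumulation (fromkeys zero-init plus an index-based running-total update pass) with a group-by formulation: dedup the distinct carreras in first-appearance order, then build the result by a per-carrera filtered sum over the whole input.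
import Mathlib
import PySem

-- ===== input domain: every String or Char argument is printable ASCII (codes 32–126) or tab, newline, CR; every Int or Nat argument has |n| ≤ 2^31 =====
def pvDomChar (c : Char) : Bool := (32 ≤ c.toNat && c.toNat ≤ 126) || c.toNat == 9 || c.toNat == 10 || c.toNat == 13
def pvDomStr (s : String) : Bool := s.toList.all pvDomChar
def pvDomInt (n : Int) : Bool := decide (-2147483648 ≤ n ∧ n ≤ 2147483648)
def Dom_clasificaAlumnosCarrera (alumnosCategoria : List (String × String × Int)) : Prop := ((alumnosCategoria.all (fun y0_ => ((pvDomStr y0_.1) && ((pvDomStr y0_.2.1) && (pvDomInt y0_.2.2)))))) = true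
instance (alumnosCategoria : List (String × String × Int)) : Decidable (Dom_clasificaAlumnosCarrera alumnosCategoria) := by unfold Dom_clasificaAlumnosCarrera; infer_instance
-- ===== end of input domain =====

-- B replaces A's incremental dict accumulation (fromkeys zero-init + running-total update pass)
-- with a group-by: dedup the carreras in first-appearance order, then a per-carrera filtered sum.

-- ===== PORT A =====
def clasificaAlumnosCarrera (alumnosCategoria : List (String × String × Int)) : List (String × Int) :=
  -- keys2 = list(alumnosCategoria.keys())
  let keys2 := alumnosCategoria.map (fun p => (p.1, p.2.1))
  -- for i in range(len(...)): carreras.append(keys2[i][1])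
  let carreras := (PySem.List.pyRange 0 (alumnosCategoria.length : Int) 1).foldl
      (fun acc i => acc ++ [(PySem.List.pyGetD keys2 i ("", "")).2]) ([] : List String)
  -- alumnosCarrera = dict.fromkeys(carreras, 0)
  let alumnosCarrera := carreras.foldl (fun d k => d.insert k (0 : Int))
      (PySem.Dict.empty : PySem.Dict String Int)
  let keys := alumnosCategoria.map (fun p => (p.1, p.2.1))
  let values := alumnosCategoria.map (fun p => p.2.2)
  -- for i in range(len(...)): if keys[i][1] in alumnosCarrera: val = int(get)+values[i]; update
  let final := (PySem.List.pyRange 0 (alumnosCategoria.length : Int) 1).foldl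
      (fun d i =>
        if d.contains (PySem.List.pyGetD keys i ("", "")).2 then
          d.insert (PySem.List.pyGetD keys i ("", "")).2
            (d.getD (PySem.List.pyGetD keys i ("", "")).2 0 + PySem.List.pyGetD values i 0)
        else d) alumnosCarrera
  final.items

-- ===== PORT B =====
def clasificaAlumnosCarrera_alt (alumnosCategoria : List (String × String × Int)) : List (String × Int) :=
  -- for key in ...: if key[1] not in carreras: carreras.append(key[1])
  let carreras := alumnosCategoria.foldl
      (fun acc p => if acc.contains p.2.1 then acc else acc ++ [p.2.1]) ([] : List String)
  -- {c: sum(v for k, v in ... if k[1] == c) for c in carreras}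
  carreras.map (fun c =>
    (c, ((alumnosCategoria.filter (fun p => p.2.1 == c)).map (fun p => p.2.2)).sum))

-- ===== PRECONDITION & SPEC =====
def Spec_clasificaAlumnosCarrera (alumnosCategoria : List (String × String × Int)) (out : List (String × Int)) : Prop := out = clasificaAlumnosCarrera_alt alumnosCategoria
instance (alumnosCategoria : List (String × String × Int)) (out : List (String × Int)) : Decidable (Spec_clasificaAlumnosCarrera alumnosCategoria out) := by unfold Spec_clasificaAlumnosCarrera; infer_instance

-- ===== CLAIM (what is proved, stated in full; the proofs are below) =====
def Claim_equal_clasificaAlumnosCarrera : Prop := ∀ (alumnosCategoria : List (String × String × Int)), Dom_clasificaAlumnosCarrera alumnosCategoria → Spec_clasificaAlumnosCarrera alumnosCategoria (clasificaAlumnosCarrera alumnosCategoria)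

-- ===== LEMMAS AND PROOFS =====

-- dict.fromkeys(l, 0): every lookup with default 0 stays 0
theorem fromkeys_getD (l : List String) (d : PySem.Dict String Int) (k : String)
    (h : d.getD k 0 = 0) :
    (l.foldl (fun d k => d.insert k (0 : Int)) d).getD k 0 = 0 := by
  induction l generalizing d with
  | nil => exact h
  | cons x xs ih =>
      simp only [List.foldl_cons]
      exact ih _ (by rw [PySem.Dict.getD_insert]; split <;> simp [h])

-- A's summing loop: under the invariant that every carrera is already a key,
-- the guard is true, keys are unchanged and lookups accumulate the filtered sum.
theorem aLoop_getD (l : List (String × String × Int)) (d : PySem.Dict String Int)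
    (h : ∀ p ∈ l, d.contains p.2.1 = true) (k : String) :
    (l.foldl (fun d p =>
        if d.contains p.2.1 then d.insert p.2.1 (d.getD p.2.1 0 + p.2.2) else d) d).getD k 0
      = d.getD k 0 + ((l.filter (fun p => p.2.1 == k)).map (fun p => p.2.2)).sum := by
  induction l generalizing d with
  | nil => simp
  | cons x xs ih =>
      simp only [List.foldl_cons, h x (by simp), if_true, List.filter_cons]
      rw [ih _ (fun p hp => by
        rw [PySem.Dict.contains_insert]
        simp [h p (by simp [hp])])]
      rw [PySem.Dict.getD_insert]
      by_cases hk : k = x.2.1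
      · simp [hk]; ring
      · have hk' : ¬ x.2.1 = k := fun h' => hk h'.symm
        simp [hk, hk']

theorem aLoop_keys (l : List (String × String × Int)) (d : PySem.Dict String Int)
    (h : ∀ p ∈ l, d.contains p.2.1 = true) :
    (l.foldl (fun d p =>
        if d.contains p.2.1 then d.insert p.2.1 (d.getD p.2.1 0 + p.2.2) else d) d).keys
      = d.keys := by
  induction l generalizing d with
  | nil => rfl
  | cons x xs ih =>
      simp only [List.foldl_cons, h x (by simp), if_true]
      rw [ih _ (fun p hp => by
        rw [PySem.Dict.contains_insert]
        simp [h p (by simp [hp])])]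
      exact PySem.Dict.keys_insert_of_contains _ _ (h x (by simp))

-- B's dedup loop is PySem.Set.ofList of the carrera projections.
theorem bDedup_eq (xs : List (String × String × Int)) :
    xs.foldl (fun acc p => if acc.contains p.2.1 then acc else acc ++ [p.2.1])
      ([] : List String)
      = PySem.Set.ofList (xs.map (fun p => p.2.1)) := by
  rw [PySem.Set.ofList_eq_foldl, List.foldl_map]
  rfl

-- ===== VERDICT (by name: the statement is the Claim_ definition above) =====
theorem clasificaAlumnosCarrera_spec : Claim_equal_clasificaAlumnosCarrera := by
  unfold Claim_equal_clasificaAlumnosCarrera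
  intro xs _
  unfold Spec_clasificaAlumnosCarrera clasificaAlumnosCarrera clasificaAlumnosCarrera_alt
  dsimp only
  rw [bDedup_eq]
  -- collapse A's first index loop into a map
  have hlen : (xs.length : Int) = ((xs.map (fun p => (p.1, p.2.1))).length : Int) := by simp
  rw [hlen,
    PySem.List.foldl_pyRange_zero_pyGetD' (xs.map (fun p => (p.1, p.2.1))) ("", "")
      (fun acc x => acc ++ [x.2]) [],
    PySem.List.foldl_append_singleton_eq_map]
  simp only [List.nil_append]
  -- collapse A's second index loop into a fold over xs
  have hget : ∀ i : Int,
      (PySem.List.pyGetD (xs.map (fun p => (p.1, p.2.1))) i ("", "")) =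
        (fun p : String × String × Int => (p.1, p.2.1)) (PySem.List.pyGetD xs i ("", "", 0)) ∧
      (PySem.List.pyGetD (xs.map (fun p => p.2.2)) i 0) =
        (fun p : String × String × Int => p.2.2) (PySem.List.pyGetD xs i ("", "", 0)) := by
    intro i
    exact ⟨PySem.List.pyGetD_map _ xs i ("", "", 0), PySem.List.pyGetD_map _ xs i ("", "", 0)⟩
  have hloop2 : ∀ (d0 : PySem.Dict String Int),
      (PySem.List.pyRange 0 (xs.length : Int) 1).foldl
        (fun d i =>
          if d.contains (PySem.List.pyGetD (xs.map (fun p => (p.1, p.2.1))) i ("", "")).2 then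
            d.insert (PySem.List.pyGetD (xs.map (fun p => (p.1, p.2.1))) i ("", "")).2
              (d.getD (PySem.List.pyGetD (xs.map (fun p => (p.1, p.2.1))) i ("", "")).2 0
                + PySem.List.pyGetD (xs.map (fun p => p.2.2)) i 0)
          else d) d0
      = xs.foldl (fun d p =>
          if d.contains p.2.1 then d.insert p.2.1 (d.getD p.2.1 0 + p.2.2) else d) d0 := by
    intro d0
    have := PySem.List.foldl_pyRange_zero_pyGetD' xs ("", "", 0)
      (fun (d : PySem.Dict String Int) (p : String × String × Int) =>
        if d.contains p.2.1 then d.insert p.2.1 (d.getD p.2.1 0 + p.2.2) else d) d0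
    rw [← this]
    congr 1
    funext d i
    rw [(hget i).1, (hget i).2]
  rw [← hlen]
  simp only [hloop2]
  -- name the fromkeys dict
  set c := (xs.map (fun p => (p.1, p.2.1))).map (fun q : String × String => q.2) with hc
  have hcmap : c = xs.map (fun p => p.2.1) := by rw [hc, List.map_map]; rfl
  set d0 := c.foldl (fun d k => d.insert k (0 : Int)) (PySem.Dict.empty : PySem.Dict String Int) with hd0
  -- keys of d0 are the deduped carreras
  have hkeys0 : d0.keys = PySem.Set.ofList c := by
    rw [hd0, PySem.Dict.keys_foldl_insert c (fun _ _ => (0 : Int)) PySem.Dict.empty]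
    simp [PySem.Set.update_nil_left]
  have hcont : ∀ p ∈ xs, d0.contains p.2.1 = true := by
    intro p hp
    rw [PySem.Dict.contains_iff_mem_keys, hkeys0, PySem.Set.mem_ofList, hcmap]
    exact List.mem_map_of_mem hp
  -- A's final keys
  have hkA : (xs.foldl (fun d p =>
      if d.contains p.2.1 then d.insert p.2.1 (d.getD p.2.1 0 + p.2.2) else d) d0).keys
      = PySem.Set.ofList (xs.map (fun p => p.2.1)) := by
    rw [aLoop_keys xs d0 hcont, hkeys0, hcmap]
  -- A's lookups are the filtered sums
  have hval : ∀ k, (xs.foldl (fun d p =>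
        if d.contains p.2.1 then d.insert p.2.1 (d.getD p.2.1 0 + p.2.2) else d) d0).getD k 0
      = ((xs.filter (fun p => p.2.1 == k)).map (fun p => p.2.2)).sum := by
    intro k
    rw [aLoop_getD xs d0 hcont k, fromkeys_getD c PySem.Dict.empty k (by simp)]
    simp
  -- conclude on items
  rw [PySem.Dict.items_eq_map_keys _ (by rw [hkA]; exact PySem.Set.nodup_ofList _) 0, hkA]
  exact List.map_congr_left (fun k _ => by rw [hval k])
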